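-- pv_equiv track=rewrite | github.com/pouyashaeri/LeetCode | StableSignal.py | check_stable_signal
-- ===== SOURCE A (Python) =====
-- def check_stable_signal(data, W):
--     start_time = data[0][0]
--     current_value = data[0][1]
--
--     result = []
--
--     for i in range(1, len(data)):
--         time, value = data[i]
--         if value != current_value:
--             duration = time - start_time
--             if duration >= W:
--                 result.append((start_time, data[i - 1][0]))
--             start_time = time
--             current_value = value
--
--     # Handling the end time
--     end_time = data[-1][0]
--     if end_time - start_time >= W:
--         result.append((start_time, end_time))
--
--     return result
-- ===== SOURCE B (Python) =====
-- def check_stable_signal(data, W):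
--     end_time = data[-1][0]
--
--     def go(seg):
--         # seg starts at the first sample of a run (or is empty)
--         if not seg:
--             return []
--         start, v = seg[0]
--         run_last = start
--         rest = seg[1:]
--         while rest and rest[0][1] == v:
--             run_last = rest[0][0]
--             rest = rest[1:]
--         boundary = rest[0][0] if rest else end_time
--         tail = go(rest)
--         if boundary - start >= W:
--             return [(start, run_last)] + tail
--         return tail
--
--     return go(data)
-- ===== Notes on version B (the rewrite author's own statement) =====
-- stated objective: alternative
-- what changed: Replaces A's flat index loop with mutable start/current state, data[i-1] back-indexing and a separate trailing end-time block by a recursive run-peeling decomposition: a recursive helper consumes one run at a time (an inner peel advances over equal values), decides that run immediately against its boundary, and builds the result back-to-front by prepending to the recursive tail; the final run is handled by the same code path via the captured end_time.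
import Mathlib
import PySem

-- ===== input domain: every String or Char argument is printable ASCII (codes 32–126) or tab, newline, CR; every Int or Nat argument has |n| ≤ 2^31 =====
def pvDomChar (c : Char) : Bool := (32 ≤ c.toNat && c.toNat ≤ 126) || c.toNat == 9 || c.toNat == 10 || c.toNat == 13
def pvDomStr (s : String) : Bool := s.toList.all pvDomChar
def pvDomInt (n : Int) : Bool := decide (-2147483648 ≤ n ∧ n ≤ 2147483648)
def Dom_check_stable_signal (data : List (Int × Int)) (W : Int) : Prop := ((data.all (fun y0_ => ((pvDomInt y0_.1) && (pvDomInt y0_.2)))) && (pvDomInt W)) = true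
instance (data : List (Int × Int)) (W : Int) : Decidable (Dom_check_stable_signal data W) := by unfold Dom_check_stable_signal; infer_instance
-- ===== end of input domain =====

-- B re-implements A by recursive run-peeling (consume one run, decide it, prepend to the recursive tail);
-- equivalence of the return values is proved for nonempty data (A raises IndexError on []).

-- ===== PORT A =====
-- loop body of A's 'for i in range(1, len(data))', named so the proofs can speak about it
def pvStepA (data : List (Int × Int)) (W : Int)
    (s : Int × Int × List (Int × Int)) (i : Int) : Int × Int × List (Int × Int) :=
  let time := (PySem.List.pyGetD data i (0, 0)).1
  let value := (PySem.List.pyGetD data i (0, 0)).2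
  if value ≠ s.2.1 then
    let duration := time - s.1
    let result' := if duration ≥ W then s.2.2 ++ [(s.1, (PySem.List.pyGetD data (i - 1) (0, 0)).1)]
                   else s.2.2
    (time, value, result')
  else s

-- A's trailing 'Handling the end time' block
def pvFinishA (data : List (Int × Int)) (W : Int)
    (s : Int × Int × List (Int × Int)) : List (Int × Int) :=
  let end_time := (PySem.List.pyGetD data (-1) (0, 0)).1
  if end_time - s.1 ≥ W then s.2.2 ++ [(s.1, end_time)] else s.2.2

def check_stable_signal (data : List (Int × Int)) (W : Int) : List (Int × Int) :=
  let start_time := (PySem.List.pyGetD data 0 (0, 0)).1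
  let current_value := (PySem.List.pyGetD data 0 (0, 0)).2
  pvFinishA data W
    ((PySem.List.pyRange 1 (PySem.List.len data) 1).foldl (pvStepA data W)
      (start_time, current_value, ([] : List (Int × Int))))

-- ===== PORT B =====
-- Source B's inner 'while rest and rest[0][1] == v' peel: returns (run_last, rest) after the run
def pvPeel (v : Int) : Int → List (Int × Int) → Int × List (Int × Int)
  | last, [] => (last, [])
  | last, (t, w) :: rest => if w = v then pvPeel v t rest else (last, (t, w) :: rest)

-- termination fact for pvGo (cited in its decreasing_by)
theorem pvPeel_length_le (v : Int) : ∀ (last : Int) (rest : List (Int × Int)),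
    (pvPeel v last rest).2.length ≤ rest.length := by
  intro last rest
  induction rest generalizing last with
  | nil => simp [pvPeel]
  | cons p r ih =>
    cases p with
    | mk t w =>
      by_cases h : w = v
      · simp only [pvPeel, if_pos h]
        exact Nat.le_trans (ih t) (Nat.le_succ _)
      · simp [pvPeel, h]

-- Source B's recursive helper 'go'
def pvGo (W e : Int) : List (Int × Int) → List (Int × Int)
  | [] => []
  | (start, v) :: rest0 =>
      let p := pvPeel v start rest0
      let boundary := match p.2 with | [] => e | (t, _) :: _ => t
      let tail := pvGo W e p.2
      if boundary - start ≥ W then (start, p.1) :: tail else tail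
termination_by l => l.length
decreasing_by
  have := pvPeel_length_le v start rest0
  simp only [List.length_cons]
  omega

def check_stable_signal_alt (data : List (Int × Int)) (W : Int) : List (Int × Int) :=
  let end_time := (PySem.List.pyGetD data (-1) (0, 0)).1
  pvGo W end_time data

-- ===== PRECONDITION & SPEC =====
-- Pre_ excludes only the empty list, on which A raises IndexError at data[0].
def Pre_check_stable_signal (data : List (Int × Int)) (W : Int) : Prop := data ≠ []
instance (data : List (Int × Int)) (W : Int) : Decidable (Pre_check_stable_signal data W) := by
  unfold Pre_check_stable_signal; infer_instance

def pvWitness_check_stable_signal : (List (Int × Int)) × Int := ([(0, 0), (3, 1)], 2)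

def Spec_check_stable_signal (data : List (Int × Int)) (W : Int) (out : List (Int × Int)) : Prop := out = check_stable_signal_alt data W
instance (data : List (Int × Int)) (W : Int) (out : List (Int × Int)) : Decidable (Spec_check_stable_signal data W out) := by unfold Spec_check_stable_signal; infer_instance

-- ===== CLAIM (what is proved, stated in full; the proofs are below) =====
def Claim_equal_check_stable_signal : Prop := ∀ (data : List (Int × Int)) (W : Int), Dom_check_stable_signal data W → Pre_check_stable_signal data W → Spec_check_stable_signal data W (check_stable_signal data W)

-- ===== LEMMAS AND PROOFS =====

-- Proof-only intermediate representation: the list of runs (start_time, last_sample_time, boundary_time)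
def pvRuns : Int → Int → Int → List (Int × Int) → List (Int × Int × Int)
  | start_t, last_t, _, [] => [(start_t, last_t, last_t)]
  | start_t, last_t, cur_v, (t, v) :: rest =>
      if v ≠ cur_v then (start_t, last_t, t) :: pvRuns t t v rest
      else pvRuns start_t t cur_v rest

def pvSel (W : Int) (runs : List (Int × Int × Int)) : List (Int × Int) :=
  (runs.filter (fun r => decide (r.2.2 - r.1 ≥ W))).map (fun r => (r.1, r.2.1))

-- time of the last sample, seeded with a default
def pvLastT : Int → List (Int × Int) → Int
  | d, [] => d
  | _, (t, _) :: r => pvLastT t r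

theorem pvSel_cons (W : Int) (r : Int × Int × Int) (rs : List (Int × Int × Int)) :
    pvSel W (r :: rs) = (if r.2.2 - r.1 ≥ W then [(r.1, r.2.1)] else []) ++ pvSel W rs := by
  simp only [pvSel, List.filter_cons]
  split_ifs <;> simp_all

theorem pv_loop_eq (W : Int) (data : List (Int × Int)) :
    ∀ (rest pre : List (Int × Int)) (p : Int × Int) (start cur : Int) (res : List (Int × Int)),
    data = pre ++ p :: rest →
    pvFinishA data W
      ((PySem.List.pyRange ((pre.length : Int) + 1) (PySem.List.len data) 1).foldl
        (pvStepA data W) (start, cur, res))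
    = res ++ pvSel W (pvRuns start p.1 cur rest) := by
  intro rest
  induction rest with
  | nil =>
    intro pre p start cur res hdata
    subst hdata
    rw [PySem.List.pyRange_one_eq_nil (by simp [PySem.List.len_eq])]
    simp only [List.foldl_nil, pvFinishA, pvRuns, pvSel]
    rw [PySem.List.pyGetD_neg_one_append_singleton]
    split_ifs <;> simp_all
  | cons q rest' ih =>
    intro pre p start cur res hdata
    have hcons : PySem.List.pyRange ((pre.length : Int) + 1) (PySem.List.len data) 1
        = ((pre.length : Int) + 1) :: PySem.List.pyRange ((pre.length : Int) + 1 + 1) (PySem.List.len data) 1 := by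
      apply PySem.List.pyRange_one_cons
      subst hdata; simp [PySem.List.len_eq]
    rw [hcons, List.foldl_cons]
    have hq : PySem.List.pyGetD data ((pre.length : Int) + 1) (0, 0) = q := by
      have h1 : ((pre.length : Int) + 1) = ((pre.length + 1 : Nat) : Int) := by push_cast; ring
      rw [h1, PySem.List.pyGetD_natCast]
      subst hdata
      simp [List.getD]
    have hp : PySem.List.pyGetD data ((pre.length : Int) + 1 - 1) (0, 0) = p := by
      have h1 : ((pre.length : Int) + 1 - 1) = ((pre.length : Nat) : Int) := by ring
      rw [h1, PySem.List.pyGetD_natCast]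
      subst hdata
      simp [List.getD]
    have hlen : ((pre.length : Int) + 1 + 1) = (((pre ++ [p]).length : Nat) : Int) + 1 := by
      simp
    by_cases hv : q.2 = cur
    · -- value == current_value: state unchanged
      have hstep : pvStepA data W (start, cur, res) ((pre.length : Int) + 1) = (start, cur, res) := by
        simp [pvStepA, hq, hv]
      rw [hstep, hlen, ih (pre ++ [p]) q start cur res (by simp [hdata])]
      simp [pvRuns, hv]
    · -- value != current_value
      have hstep : pvStepA data W (start, cur, res) ((pre.length : Int) + 1)
          = (q.1, q.2, res ++ (if q.1 - start ≥ W then [(start, p.1)] else [])) := by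
        simp only [pvStepA, hq, hp]
        split_ifs <;> simp_all
      rw [hstep, hlen, ih (pre ++ [p]) q q.1 q.2 _ (by simp [hdata])]
      have hruns : pvRuns start p.1 cur (q :: rest')
          = (start, p.1, q.1) :: pvRuns q.1 q.1 q.2 rest' := by
        cases q with
        | mk t v => simp [pvRuns, hv]
      rw [hruns, pvSel_cons]
      simp

-- data[-1][0] computed by pvLastT on a cons cell
theorem pv_lastT_eq (t0 v0 : Int) (rest : List (Int × Int)) :
    (PySem.List.pyGetD ((t0, v0) :: rest) (-1) (0, 0)).1 = pvLastT t0 rest := by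
  induction rest generalizing t0 v0 with
  | nil => simp [pvLastT, PySem.List.pyGetD, PySem.List.pyGet?, PySem.List.pyIdx?]
  | cons q r ih =>
    cases q with
    | mk t v =>
      have h1 : PySem.List.pyGetD ((t0, v0) :: (t, v) :: r) (-1) (0, 0)
          = PySem.List.pyGetD ((t, v) :: r) (-1) (0, 0) := by
        simp [PySem.List.pyGetD, PySem.List.pyGet?, PySem.List.pyIdx?]
        rfl
      rw [h1, ih, pvLastT]

-- B's recursion agrees with the runs representation (the invariant: 'last' is the time of the
-- last consumed sample, and the overall last time is e)
theorem pvGo_eq (W e : Int) :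
    ∀ (rest : List (Int × Int)) (start last v : Int), pvLastT last rest = e →
    (if (match (pvPeel v last rest).2 with | [] => e | (t, _) :: _ => t) - start ≥ W
     then (start, (pvPeel v last rest).1) :: pvGo W e (pvPeel v last rest).2
     else pvGo W e (pvPeel v last rest).2)
    = pvSel W (pvRuns start last v rest) := by
  intro rest
  induction rest with
  | nil =>
    intro start last v hl
    simp only [pvLastT] at hl
    subst hl
    simp only [pvPeel, pvGo, pvRuns, pvSel]
    split_ifs <;> simp_all
  | cons q r ih =>
    intro start last v hl
    cases q with
    | mk t w =>
      simp only [pvLastT] at hl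
      by_cases h : w = v
      · -- same value: peel continues
        have hpeel : pvPeel v last ((t, w) :: r) = pvPeel v t r := by simp [pvPeel, h]
        have hruns : pvRuns start last v ((t, w) :: r) = pvRuns start t v r := by
          simp [pvRuns, h]
        rw [hpeel, hruns, ih start t v hl]
      · -- value changes: run ends here
        simp only [pvPeel, if_neg h]
        have hruns : pvRuns start last v ((t, w) :: r)
            = (start, last, t) :: pvRuns t t w r := by
          simp [pvRuns, h]
        rw [hruns, pvSel_cons]
        have htail : pvGo W e ((t, w) :: r) = pvSel W (pvRuns t t w r) := by
          rw [pvGo]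
          exact ih t t w hl
        split_ifs with hw
        · simp [htail]
        · simp [htail]

-- ===== VERDICT (by name: the statement is the Claim_ definition above) =====
theorem check_stable_signal_spec : Claim_equal_check_stable_signal := by
  intro data W _ hpre
  unfold Spec_check_stable_signal
  match data, hpre with
  | (t0, v0) :: rest, _ =>
    have hA := pv_loop_eq W ((t0, v0) :: rest) rest [] (t0, v0) t0 v0 []
      (by simp)
    simp only [List.length_nil, Nat.cast_zero, zero_add, List.nil_append] at hA
    have hB : check_stable_signal_alt ((t0, v0) :: rest) W
        = pvSel W (pvRuns t0 t0 v0 rest) := by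
      simp only [check_stable_signal_alt]
      rw [pv_lastT_eq, pvGo]
      exact pvGo_eq W (pvLastT t0 rest) rest t0 t0 v0 rfl
    simp only [check_stable_signal, PySem.List.pyGetD_zero_cons]
    rw [hA, hB]
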